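-- pv_equiv track=rewrite | github.com/jonathandunn/c2xg | c2xg/Parser.py | parse_for_examples
-- ===== SOURCE A (Python) =====
-- def parse_for_examples(construction, line):
--
--     indexes = [-1]
--     matches = 0
--
--     #Iterate over line from left to right
--     for i in range(len(line)):
--
--         unit = line[i]
--
--         #Check if the first unit matches, to merit further consideration
--         if construction[0][1] == unit[construction[0][0]-1]:
--
--             match = True    #Initiate match flag to True
--
--             #Check each future unit in candidate
--             for j in range(1, len(construction)):
--
--                 #If we reach the padded part of the construction, break it off
--                 if construction[j] == (0,0):
--                     break
--
--                 #If this unit doesn't match, stop looking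
--                 if i+j < len(line):
--                     if line[i+j][construction[j][0] - 1] != construction[j][1]:
--
--                         match = False
--                         break
--
--                 #This construction is longer than the remaining line
--                 else:
--                     match = False
--                     break
--
--             #Done with candidate
--             if match == True:
--                 matches += 1
--                 indexes.append(i)    #Save indexes covered by construction match
--
--     return construction, indexes[1:], matches
-- ===== SOURCE B (Python) =====
-- def parse_for_examples(construction, line):
--     # Pattern-major candidate pruning: truncate the padded construction once,
--     # then repeatedly filter the set of surviving start positions per pattern slot.
--     pat = [construction[0]]
--     for sym in construction[1:]:
--         if sym == (0, 0):
--             break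
--         pat.append(sym)
--     starts = list(range(len(line) - len(pat) + 1))
--     for j, (s, v) in enumerate(pat):
--         starts = [i for i in starts if line[i + j][s - 1] == v]
--     return construction, starts, len(starts)
-- ===== Notes on version B (the rewrite author's own statement) =====
-- stated objective: alternative
-- what changed: A scans text positions with a per-candidate inner loop carrying a match flag and an in-loop terminator check; B truncates the padded pattern once, then prunes a list of surviving start positions slot by slot (pattern-major filtering).
-- outside the precondition, e.g. on parse_for_examples([], []): A returns ([], [], 0), B raises IndexError
import Mathlib
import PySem

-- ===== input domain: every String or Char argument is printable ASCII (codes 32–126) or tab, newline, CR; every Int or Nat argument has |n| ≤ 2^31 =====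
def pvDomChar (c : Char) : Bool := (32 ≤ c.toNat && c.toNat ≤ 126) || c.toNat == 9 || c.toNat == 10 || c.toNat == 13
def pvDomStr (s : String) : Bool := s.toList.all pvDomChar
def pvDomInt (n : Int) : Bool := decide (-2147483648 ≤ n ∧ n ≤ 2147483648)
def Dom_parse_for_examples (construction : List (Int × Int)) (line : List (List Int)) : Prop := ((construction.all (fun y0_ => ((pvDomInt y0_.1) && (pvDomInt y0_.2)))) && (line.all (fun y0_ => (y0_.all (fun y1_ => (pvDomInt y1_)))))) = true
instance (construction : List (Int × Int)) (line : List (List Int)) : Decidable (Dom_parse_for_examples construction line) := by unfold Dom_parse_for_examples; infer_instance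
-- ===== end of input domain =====

-- B replaces A's text-position scan with flagged inner loop by a pattern-major
-- candidate-pruning pass over a once-truncated pattern (alternative decomposition).


-- ===== PORT A =====
-- unit[k] with Python negative indexing; total form, exact under Pre_ (every probed cell in range)
def pvAt (u : List Int) (k : Int) : Int := (PySem.List.pyGet? u k).getD 0

-- A's inner loop 'for j in range(1, len(construction))' with its breaks, as recursion on j
def innerA (c : List (Int × Int)) (line : List (List Int)) (i : Nat) (j : Nat) : Bool :=
  if j < c.length then
    let cj := c.getD j (0, 0)
    if cj = (0, 0) then true
    else if i + j < line.length then
      if pvAt (line.getD (i + j) []) (cj.1 - 1) ≠ cj.2 then false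
      else innerA c line i (j + 1)
    else false
  else true
termination_by c.length - j

def parse_for_examples (construction : List (Int × Int)) (line : List (List Int)) : (List (Int × Int)) × List Int × Int :=
  let init : List Int × Int := ([-1], 0)
  let res := (List.range line.length).foldl (fun acc i =>
    let unit := line.getD i []
    if (construction.getD 0 (0, 0)).2 = pvAt unit ((construction.getD 0 (0, 0)).1 - 1) then
      if innerA construction line i 1 then (acc.1 ++ [(i : Int)], acc.2 + 1) else acc
    else acc) init
  (construction, res.1.drop 1, res.2)

-- ===== PORT B =====
-- line[k] with Python indexing; total form, exact under Pre_
def unitAt (line : List (List Int)) (k : Int) : List Int := (PySem.List.pyGet? line k).getD []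

-- B's truncation of the padded construction ("pat = [construction[0]]; ... break at (0,0)")
def effPat (c : List (Int × Int)) : List (Int × Int) :=
  c.getD 0 (0, 0) :: (c.drop 1).takeWhile (fun x => x ≠ (0, 0))

def parse_for_examples_alt (construction : List (Int × Int)) (line : List (List Int)) : (List (Int × Int)) × List Int × Int :=
  let pat := effPat construction
  let starts0 : List Int := (List.range (line.length + 1 - pat.length)).map (fun i => (i : Int))
  let starts := (PySem.List.enumerate pat).foldl (fun st q =>
      st.filter (fun i => pvAt (unitAt line (i + q.1)) (q.2.1 - 1) == q.2.2)) starts0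
  (construction, starts, (starts.length : Int))

-- ===== PRECONDITION & SPEC =====
-- Pre_ excludes exactly the inputs on which Python A raises IndexError — an empty construction
-- probed on a nonempty line, or a cell A's scan actually probes (slot 0 at every position; an
-- inner slot j only at an in-range position whose slots 0..j-1 all matched) whose slot index is
-- out of range for that unit — plus the single corner of an empty construction WITH an empty
-- line, where A returns ([], [], 0) vacuously but B (which inspects construction[0] before
-- looping) naturally raises; see the cite.
def Pre_parse_for_examples (construction : List (Int × Int)) (line : List (List Int)) : Prop :=
  construction ≠ [] ∧
  ∀ i < line.length, ∀ j < (effPat construction).length, i + j < line.length →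
    (∀ j' < j, PySem.List.pyGet? (line.getD (i + j') []) (((effPat construction).getD j' (0, 0)).1 - 1)
        = some ((effPat construction).getD j' (0, 0)).2) →
    PySem.Raise.InRange (line.getD (i + j) []).length (((effPat construction).getD j (0, 0)).1 - 1)
instance (construction : List (Int × Int)) (line : List (List Int)) : Decidable (Pre_parse_for_examples construction line) := by unfold Pre_parse_for_examples; infer_instance

def pvWitness_parse_for_examples : (List (Int × Int)) × List (List Int) :=
  ([(1, 2), (0, 0)], [[2], [3], [2]])

def Spec_parse_for_examples (construction : List (Int × Int)) (line : List (List Int)) (out : (List (Int × Int)) × List Int × Int) : Prop := out = parse_for_examples_alt construction line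
instance (construction : List (Int × Int)) (line : List (List Int)) (out : (List (Int × Int)) × List Int × Int) : Decidable (Spec_parse_for_examples construction line out) := by unfold Spec_parse_for_examples; infer_instance

-- ===== CLAIM (what is proved, stated in full; the proofs are below) =====
def Claim_equal_parse_for_examples : Prop := ∀ (construction : List (Int × Int)) (line : List (List Int)), Dom_parse_for_examples construction line → Pre_parse_for_examples construction line → Spec_parse_for_examples construction line (parse_for_examples construction line)

-- ===== LEMMAS AND PROOFS =====

-- the per-slot comparison both programs make at text position i+j with slot pair q
def mAt (ln : List (List Int)) (i j : Nat) (q : Int × Int) : Bool :=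
  pvAt (ln.getD (i + j) []) (q.1 - 1) == q.2

-- A's per-position decision
def pA (c : List (Int × Int)) (ln : List (List Int)) (i : Nat) : Bool :=
  ((c.getD 0 (0, 0)).2 == pvAt (ln.getD i []) ((c.getD 0 (0, 0)).1 - 1)) && innerA c ln i 1

-- elements strictly inside a takeWhile prefix agree with the source and satisfy the predicate
lemma takeWhile_getD_mem (p : Int × Int → Bool) (l : List (Int × Int)) (k : Nat)
    (h : k < (l.takeWhile p).length) :
    (l.takeWhile p).getD k (0, 0) = l.getD k (0, 0) ∧ p ((l.takeWhile p).getD k (0, 0)) = true := by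
  induction l generalizing k with
  | nil => simp at h
  | cons x xs ih =>
    cases hx : p x with
    | false => simp [hx] at h
    | true =>
      simp only [List.takeWhile_cons, hx] at h ⊢
      cases k with
      | zero => simpa using hx
      | succ k => simpa using ih k (by simpa using h)

-- the element just after a proper takeWhile (fun x => x ≠ (0,0)) prefix is the terminator
lemma takeWhile_getD_stop (l : List (Int × Int))
    (h : (l.takeWhile (fun x => x ≠ (0, 0))).length < l.length) :
    l.getD (l.takeWhile (fun x => x ≠ (0, 0))).length (0, 0) = (0, 0) := by
  induction l with
  | nil => simp at h
  | cons x xs ih =>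
    by_cases hx : x = (0, 0)
    · simp [hx]
    · simp only [List.takeWhile_cons] at h ⊢
      simpa [hx] using ih (by simpa [hx] using h)

lemma effPat_len_pos (c : List (Int × Int)) : 0 < (effPat c).length := by
  simp [effPat]

lemma effPat_len_le (c : List (Int × Int)) (hc : c ≠ []) : (effPat c).length ≤ c.length := by
  have := (List.takeWhile_prefix (l := c.drop 1) (p := fun x => x ≠ (0, 0))).length_le
  have hc' : 1 ≤ c.length := List.length_pos_of_ne_nil hc
  simp only [effPat, List.length_cons, List.length_drop] at *
  omega

lemma effPat_getD_zero (c : List (Int × Int)) :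
    (effPat c).getD 0 (0, 0) = c.getD 0 (0, 0) := by
  simp [effPat]

lemma getD_drop_one (c : List (Int × Int)) (k : Nat) :
    (c.drop 1).getD k (0, 0) = c.getD (k + 1) (0, 0) := by
  cases c <;> simp

lemma effPat_getD_mid (c : List (Int × Int)) (j : Nat) (hj1 : 1 ≤ j)
    (hjm : j < (effPat c).length) :
    (effPat c).getD j (0, 0) = c.getD j (0, 0) ∧ (effPat c).getD j (0, 0) ≠ (0, 0) := by
  obtain ⟨k, rfl⟩ : ∃ k, j = k + 1 := ⟨j - 1, by omega⟩
  have hk : k < ((c.drop 1).takeWhile (fun x => x ≠ (0, 0))).length := by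
    simpa [effPat] using hjm
  have h := takeWhile_getD_mem (fun x => x ≠ (0, 0)) (c.drop 1) k hk
  have hget : (effPat c).getD (k + 1) (0, 0)
      = ((c.drop 1).takeWhile (fun x => x ≠ (0, 0))).getD k (0, 0) := by
    simp [effPat]
  constructor
  · rw [hget, h.1, getD_drop_one]
  · rw [hget]; simpa using h.2

lemma effPat_term (c : List (Int × Int)) (hm : (effPat c).length < c.length) :
    c.getD (effPat c).length (0, 0) = (0, 0) := by
  have hlt : ((c.drop 1).takeWhile (fun x => x ≠ (0, 0))).length < (c.drop 1).length := by
    simp only [effPat, List.length_cons] at hm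
    simp only [List.length_drop]
    omega
  have h := takeWhile_getD_stop (c.drop 1) hlt
  rw [getD_drop_one] at h
  simpa [effPat] using h

-- characterization of A's inner loop: all pre-terminator slots from j on match and fit
lemma innerA_iff (c : List (Int × Int)) (ln : List (List Int)) (hc : c ≠ [])
    (i j : Nat) (hj1 : 1 ≤ j) (hjm : j ≤ (effPat c).length) :
    innerA c ln i j = true ↔
      ∀ jj, j ≤ jj → jj < (effPat c).length →
        (i + jj < ln.length ∧ mAt ln i jj ((effPat c).getD jj (0, 0)) = true) := by
  generalize hfuel : (effPat c).length - j = fuel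
  induction fuel generalizing j with
  | zero =>
    have hj : j = (effPat c).length := by omega
    subst hj
    constructor
    · intro _ jj h1 h2; omega
    · intro _
      rw [innerA]
      by_cases hlen : (effPat c).length < c.length
      · have ht := effPat_term c hlen
        rw [List.getD_eq_getElem c (0, 0) hlen] at ht
        simp [hlen, ht]
      · simp [hlen]
  | succ fuel ih =>
    have hjlt : j < (effPat c).length := by omega
    obtain ⟨hcj, hne⟩ := effPat_getD_mid c j hj1 hjlt
    have hjc : j < c.length := lt_of_lt_of_le hjlt (effPat_len_le c hc)
    rw [innerA]
    simp only [hjc, if_true, ← hcj, hne, if_false]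
    by_cases hfit : i + j < ln.length
    · simp only [hfit, if_true]
      by_cases hmatch : mAt ln i j ((effPat c).getD j (0, 0)) = true
      · have hmatch' : ¬ pvAt (ln.getD (i + j) []) (((effPat c).getD j (0, 0)).1 - 1)
            ≠ ((effPat c).getD j (0, 0)).2 := by
          simpa [mAt] using hmatch
        rw [if_neg hmatch']
        rw [ih (j + 1) (by omega) (by omega) (by omega)]
        constructor
        · intro H jj h1 h2
          rcases Nat.eq_or_lt_of_le h1 with h | h
          · exact h ▸ ⟨hfit, hmatch⟩
          · exact H jj h h2
        · intro H jj h1 h2; exact H jj (by omega) h2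
      · have hmatch' : pvAt (ln.getD (i + j) []) (((effPat c).getD j (0, 0)).1 - 1)
            ≠ ((effPat c).getD j (0, 0)).2 := by
          simpa [mAt] using hmatch
        rw [if_pos hmatch']
        simp only [Bool.false_eq_true, false_iff]
        intro H
        exact hmatch (H j le_rfl hjlt).2
    · simp only [hfit, if_false]
      simp only [Bool.false_eq_true, false_iff]
      intro H
      exact hfit (H j le_rfl hjlt).1

-- A's decision, characterized against the effective pattern
lemma pA_iff (c : List (Int × Int)) (ln : List (List Int)) (hc : c ≠ []) (i : Nat)
    (hi : i < ln.length) :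
    pA c ln i = true ↔
      (i + (effPat c).length ≤ ln.length ∧
       ∀ jj < (effPat c).length, mAt ln i jj ((effPat c).getD jj (0, 0)) = true) := by
  have h0 : ((c.getD 0 (0, 0)).2 == pvAt (ln.getD i []) ((c.getD 0 (0, 0)).1 - 1))
      = mAt ln i 0 ((effPat c).getD 0 (0, 0)) := by
    simp only [mAt, effPat_getD_zero, Nat.add_zero]
    simp [eq_comm]
  rw [pA, Bool.and_eq_true, h0,
    innerA_iff c ln hc i 1 le_rfl (effPat_len_pos c)]
  constructor
  · rintro ⟨hm0, H⟩
    constructor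
    · rcases Nat.lt_or_ge 1 (effPat c).length with h | h
      · have := (H ((effPat c).length - 1) (by omega) (by omega)).1
        omega
      · have := effPat_len_pos c; omega
    · intro jj hjj
      cases jj with
      | zero => exact hm0
      | succ k => exact (H (k + 1) (by omega) hjj).2
  · rintro ⟨hfit, H⟩
    refine ⟨H 0 (effPat_len_pos c), fun jj h1 h2 => ⟨by omega, H jj h2⟩⟩

-- A's outer fold, collapsed to filter + count
lemma foldA (p : Nat → Bool) (xs : List Nat) (l0 : List Int) (k0 : Int) :
    xs.foldl (fun (acc : List Int × Int) i =>
        if p i then (acc.1 ++ [(i : Int)], acc.2 + 1) else acc) (l0, k0)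
      = (l0 ++ (xs.filter p).map (fun i => (i : Int)), k0 + ((xs.filter p).length : Int)) := by
  induction xs generalizing l0 k0 with
  | nil => simp
  | cons x xs ih =>
    by_cases h : p x
    · simp [h, ih]
      omega
    · simp [h, ih]

-- B's fold of filters, collapsed to one filter with an 'all' predicate
lemma foldB {α : Type} (f : α → Int → Bool) (qs : List α) (S : List Int) :
    qs.foldl (fun st q => st.filter (f q)) S = S.filter (fun i => qs.all (fun q => f q i)) := by
  induction qs generalizing S with
  | nil => simp
  | cons q qs ih =>
    simp only [List.foldl_cons, ih, List.filter_filter, List.all_cons]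
    apply List.filter_congr
    intro a _
    rw [Bool.and_comm]

-- all over an enumerate, element-wise
lemma all_enumerate {α : Type} (xs : List α) (g : Int × α → Bool) :
    (PySem.List.enumerate xs).all g = true ↔
      ∀ k, (h : k < xs.length) → g ((k : Int), xs[k]) = true := by
  rw [List.all_eq_true]
  constructor
  · intro H k h
    have hmem : ((k : Int), xs[k]) ∈ PySem.List.enumerate xs := by
      rw [List.mem_iff_getElem]
      exact ⟨k, by simpa using h, by simp [PySem.List.getElem_enumerate]⟩
    exact H _ hmem
  · intro H x hx
    rw [List.mem_iff_getElem] at hx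
    obtain ⟨k, hk, rfl⟩ := hx
    have hk' : k < xs.length := by simpa using hk
    simpa [PySem.List.getElem_enumerate] using H k hk'

-- B's surviving-position predicate equals A's decision on fitting positions
lemma pA_eq_pB (c : List (Int × Int)) (ln : List (List Int)) (hc : c ≠ []) (i : Nat)
    (hfit : i + (effPat c).length ≤ ln.length) :
    pA c ln i
      = (PySem.List.enumerate (effPat c)).all
          (fun q => pvAt (unitAt ln ((i : Int) + q.1)) (q.2.1 - 1) == q.2.2) := by
  have hi : i < ln.length := by have := effPat_len_pos c; omega
  rw [Bool.eq_iff_iff, pA_iff c ln hc i hi, all_enumerate]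
  constructor
  · rintro ⟨-, H⟩ k h
    have hk : i + k < ln.length := by omega
    have hcast : ((i : Int) + (k : Int)) = ((i + k : Nat) : Int) := by push_cast; ring
    have hget : PySem.List.pyGet? ln ((i + k : Nat) : Int) = some (ln[i + k]'hk) := by
      have ht : ((i : Int) + (k : Int)).toNat = i + k := by omega
      simp only [PySem.List.pyGet?, PySem.List.pyIdx?, Nat.cast_add]
      rw [if_pos (by positivity), if_pos (by exact_mod_cast hk)]
      simp [ht, List.getElem?_eq_getElem hk]
    have hu : unitAt ln ((i : Int) + (k : Int)) = ln.getD (i + k) [] := by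
      rw [hcast, unitAt, hget, Option.getD_some, List.getD_eq_getElem ln [] hk]
    rw [hu]
    have := H k h
    simp only [mAt] at this
    rw [List.getD_eq_getElem (effPat c) (0, 0) h] at this
    simpa using this
  · intro H
    refine ⟨hfit, fun jj hjj => ?_⟩
    have hk : i + jj < ln.length := by omega
    have hcast : ((i : Int) + (jj : Int)) = ((i + jj : Nat) : Int) := by push_cast; ring
    have hget : PySem.List.pyGet? ln ((i + jj : Nat) : Int) = some (ln[i + jj]'hk) := by
      have ht : ((i : Int) + (jj : Int)).toNat = i + jj := by omega
      simp only [PySem.List.pyGet?, PySem.List.pyIdx?, Nat.cast_add]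
      rw [if_pos (by positivity), if_pos (by exact_mod_cast hk)]
      simp [ht, List.getElem?_eq_getElem hk]
    have hu : unitAt ln ((i : Int) + (jj : Int)) = ln.getD (i + jj) [] := by
      rw [hcast, unitAt, hget, Option.getD_some, List.getD_eq_getElem ln [] hk]
    have := H jj hjj
    rw [hu] at this
    simp only [mAt]
    rw [List.getD_eq_getElem (effPat c) (0, 0) hjj]
    simpa using this

-- the filtered position lists of the two programs coincide
lemma filter_ranges_eq (c : List (Int × Int)) (ln : List (List Int)) (hc : c ≠ []) :
    (List.range ln.length).filter (pA c ln)
      = (List.range (ln.length + 1 - (effPat c).length)).filter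
          (fun (i : Nat) => (PySem.List.enumerate (effPat c)).all
            (fun q => pvAt (unitAt ln ((i : Int) + q.1)) (q.2.1 - 1) == q.2.2)) := by
  have hm1 : 1 ≤ (effPat c).length := effPat_len_pos c
  have hsplit : List.range ln.length = List.range (ln.length + 1 - (effPat c).length)
      ++ (List.range (ln.length - (ln.length + 1 - (effPat c).length))).map
          ((ln.length + 1 - (effPat c).length) + ·) := by
    rw [← List.range_add]
    congr 1
    omega
  rw [hsplit, List.filter_append]
  have h2 : ((List.range (ln.length - (ln.length + 1 - (effPat c).length))).map
      ((ln.length + 1 - (effPat c).length) + ·)).filter (pA c ln) = [] := by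
    rw [List.filter_eq_nil_iff]
    intro a ha
    simp only [List.mem_map, List.mem_range] at ha
    obtain ⟨t, ht, rfl⟩ := ha
    have hi : (ln.length + 1 - (effPat c).length) + t < ln.length := by omega
    cases h : pA c ln ((ln.length + 1 - (effPat c).length) + t) with
    | false => simp
    | true =>
      have := (pA_iff c ln hc ((ln.length + 1 - (effPat c).length) + t) hi).mp h
      omega
  rw [h2, List.append_nil]
  apply List.filter_congr
  intro i hi
  rw [List.mem_range] at hi
  exact pA_eq_pB c ln hc i (by omega)

-- ===== VERDICT (by name: the statement is the Claim_ definition above) =====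
theorem parse_for_examples_spec : Claim_equal_parse_for_examples := by
  intro c ln _ hpre
  obtain ⟨hc, -⟩ := hpre
  unfold Spec_parse_for_examples parse_for_examples parse_for_examples_alt
  simp only []
  have hstep : (fun (acc : List Int × Int) i =>
      let unit := ln.getD i []
      if (c.getD 0 (0, 0)).2 = pvAt unit ((c.getD 0 (0, 0)).1 - 1) then
        if innerA c ln i 1 then (acc.1 ++ [(i : Int)], acc.2 + 1) else acc
      else acc)
      = (fun (acc : List Int × Int) i => if pA c ln i then (acc.1 ++ [(i : Int)], acc.2 + 1) else acc) := by
    funext acc i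
    by_cases h1 : (c.getD 0 (0, 0)).2 = pvAt (ln.getD i []) ((c.getD 0 (0, 0)).1 - 1)
      <;> by_cases h2 : innerA c ln i 1 = true
      <;> simp [pA, *]
  rw [hstep, foldA, foldB]
  have hlists : ((List.range ln.length).filter (pA c ln)).map (fun (i : Nat) => (i : Int))
      = ((List.range (ln.length + 1 - (effPat c).length)).map (fun (i : Nat) => (i : Int))).filter
          (fun i => (PySem.List.enumerate (effPat c)).all
            (fun q => pvAt (unitAt ln (i + q.1)) (q.2.1 - 1) == q.2.2)) := by
    rw [List.filter_map, filter_ranges_eq c ln hc]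
    simp [Function.comp_def]
  have hlen := congrArg List.length hlists
  simp only [List.length_map] at hlen
  simp [hlists, hlen, ← List.map_eq_flatMap, Function.comp_def]
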